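-- pv_equiv track=rewrite | github.com/sunilvengalil/ds_algo | sorting/o_n2.py | sort_string_of_lower_case_alphabet
-- ===== SOURCE A (Python) =====
-- from typing import List
--
-- def _insert_into_sorted_list(ch_list: List, sorted_upto) ->str:
--     if not ch_list:
--         return ch_list
--     # insert  ch at the last position
--     index = sorted_upto - 1
--     ch = ch_list[sorted_upto]
--     while index >= 0 and ch < ch_list[index]:
--         ch_list[index+1] = ch_list[index]
--         index -= 1
--     ch_list[index + 1] = ch
--     return ch_list
--
-- def sort_string_of_lower_case_alphabet(s: str) -> str:
--     if not s:
--         return s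
--     if len(s) == 1:
--         return s
--     result = list(s)
--     sorted_upto = 1
--     # Insert s[sorted_upto] at proper location
--     while sorted_upto < len(result):
--         _insert_into_sorted_list(result, sorted_upto)
--         sorted_upto += 1
--     # "ilnsu"
--     return "".join(result)
-- ===== SOURCE B (Python) =====
-- def sort_string_of_lower_case_alphabet(s: str) -> str:
--     # Counting sort over the ASCII range: one pass to count, one pass to emit.
--     counts = [0] * 128
--     for ch in s:
--         counts[ord(ch)] += 1
--     return "".join(chr(c) * counts[c] for c in range(128))
-- ===== Notes on version B (the rewrite author's own statement) =====
-- stated objective: faster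
-- what changed: Replaces in-place insertion sort (shifting loop per element) with a counting sort over the 128 ASCII codes: one counting pass plus one emission pass.
import Mathlib
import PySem

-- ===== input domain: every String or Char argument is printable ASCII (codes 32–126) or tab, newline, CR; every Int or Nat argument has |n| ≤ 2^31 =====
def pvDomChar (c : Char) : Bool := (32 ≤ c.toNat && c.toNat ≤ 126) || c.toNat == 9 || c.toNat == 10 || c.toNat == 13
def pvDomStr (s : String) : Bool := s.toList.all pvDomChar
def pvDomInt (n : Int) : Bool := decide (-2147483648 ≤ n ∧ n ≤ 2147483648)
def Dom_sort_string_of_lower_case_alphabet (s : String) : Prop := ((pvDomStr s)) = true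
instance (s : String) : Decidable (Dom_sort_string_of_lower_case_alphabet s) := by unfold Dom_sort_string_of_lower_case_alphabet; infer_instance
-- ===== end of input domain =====

-- B replaces A's in-place insertion sort with a counting sort over the 128 ASCII codes (asymptotically faster on the admitted domain).

-- ===== PORT A =====
-- inner while loop of _insert_into_sorted_list: while index >= 0 and ch < ch_list[index]: shift; then ch_list[index+1] = ch.
-- structural recursion on n = index + 1 (n = 0 ⟺ index = -1, the loop exit); the list writes are the same writes.
def pvInsLoop (l : List Char) (ch : Char) : Nat → List Char
  | 0 => l.set 0 ch
  | k + 1 =>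
    if ch < (PySem.List.pyGet? l ((k : Nat) : Int)).getD ch then
      pvInsLoop (l.set (k + 1) ((PySem.List.pyGet? l ((k : Nat) : Int)).getD ch)) ch k
    else
      l.set (k + 1) ch

-- _insert_into_sorted_list; ch = ch_list[sorted_upto] is always in range at call sites, so the getD default is never
-- used; the loop starts at index = sorted_upto - 1, i.e. n = sorted_upto (≥ 1 at every call, so .toNat is exact).
def pvInsert (l : List Char) (sorted_upto : Int) : List Char :=
  if l = [] then l
  else pvInsLoop l ((PySem.List.pyGet? l sorted_upto).getD 'a') sorted_upto.toNat

-- outer while loop, with fuel = len(result): sorted_upto starts at 1 and increases by 1 each iteration,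
-- so len(result) iterations always suffice and the fuel-0 branch is never the exit taken.
def pvOuter (l : List Char) (sorted_upto : Int) : Nat → List Char
  | 0 => l
  | k + 1 =>
    if sorted_upto < (l.length : Int) then pvOuter (pvInsert l sorted_upto) (sorted_upto + 1) k
    else l

def sort_string_of_lower_case_alphabet (s : String) : String :=
  if s.toList = [] then s
  else if s.toList.length = 1 then s
  else String.ofList (pvOuter s.toList 1 s.toList.length)

-- ===== PORT B =====
-- counts = [0]*128; for ch in s: counts[ord(ch)] += 1   (exact on Dom: every admitted char has code < 128)
def pvCounts (t : List Char) : List Nat :=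
  t.foldl (fun cnts ch => cnts.set ch.toNat (cnts.getD ch.toNat 0 + 1)) (List.replicate 128 0)

-- "".join(chr(c) * counts[c] for c in range(n))
def pvEmit (cnts : List Nat) (n : Nat) : List Char :=
  ((List.range n).map (fun c => List.replicate (cnts.getD c 0) (Char.ofNat c))).flatten

def sort_string_of_lower_case_alphabet_alt (s : String) : String :=
  String.ofList (pvEmit (pvCounts s.toList) 128)

-- ===== PRECONDITION & SPEC =====
def Spec_sort_string_of_lower_case_alphabet (s : String) (out : String) : Prop := out = sort_string_of_lower_case_alphabet_alt s
instance (s : String) (out : String) : Decidable (Spec_sort_string_of_lower_case_alphabet s out) := by unfold Spec_sort_string_of_lower_case_alphabet; infer_instance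

-- ===== CLAIM (what is proved, stated in full; the proofs are below) =====
def Claim_equal_sort_string_of_lower_case_alphabet : Prop := ∀ (s : String), Dom_sort_string_of_lower_case_alphabet s → Spec_sort_string_of_lower_case_alphabet s (sort_string_of_lower_case_alphabet s)

-- ===== LEMMAS AND PROOFS =====

-- ---------- Char facts ----------
theorem pv_char_le_iff (a b : Char) : a ≤ b ↔ a.toNat ≤ b.toNat := by
  rw [Char.le_def, UInt32.le_iff_toNat_le]; rfl

theorem pv_charOfNat_toNat (c : Nat) (h : c < 128) : (Char.ofNat c).toNat = c := by
  unfold Char.ofNat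
  rw [dif_pos (Or.inl (by omega) : Nat.isValidChar c)]
  simp [Char.ofNatAux, Char.toNat]

theorem pv_char_eq_ofNat_iff (ch : Char) (c : Nat) (h : c < 128) :
    (ch = Char.ofNat c) ↔ ch.toNat = c := by
  constructor
  · rintro rfl; exact pv_charOfNat_toNat c h
  · intro he; rw [← he, Char.ofNat_toNat]

-- ---------- A-side: the shifting loop is an ordered insert from the right ----------
-- pvInsR ch r inserts ch into the REVERSED sorted prefix r (descending): skip elements > ch.
def pvInsR (ch : Char) : List Char → List Char
  | [] => [ch]
  | b :: t => if ch < b then b :: pvInsR ch t else ch :: b :: t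

theorem pvInsR_perm (ch : Char) (r : List Char) : List.Perm (pvInsR ch r) (ch :: r) := by
  induction r with
  | nil => exact List.Perm.refl _
  | cons b t ih =>
      simp only [pvInsR]; split
      · exact (ih.cons b).trans (List.Perm.swap ch b t)
      · exact List.Perm.refl _

theorem pvInsR_pairwise (ch : Char) (r : List Char) (h : r.Pairwise (· ≥ ·)) :
    (pvInsR ch r).Pairwise (· ≥ ·) := by
  induction r with
  | nil => simp [pvInsR]
  | cons b t ih =>
      rw [List.pairwise_cons] at h
      simp only [pvInsR]; split
      · rename_i hlt
        rw [List.pairwise_cons]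
        refine ⟨fun y hy => ?_, ih h.2⟩
        rcases List.mem_cons.mp ((pvInsR_perm ch t).mem_iff.mp hy) with hy | hy
        · subst hy; exact le_of_lt hlt
        · exact h.1 y hy
      · rename_i hge
        rw [List.pairwise_cons]
        refine ⟨fun y hy => ?_, List.pairwise_cons.mpr h⟩
        rcases List.mem_cons.mp hy with hy | hy
        · subst hy; exact le_of_not_gt hge
        · exact le_trans (h.1 y hy) (le_of_not_gt hge)

-- the in-place loop on (r.reverse ++ x :: rest), started at n = (length of the prefix r.reverse),
-- computes the right-insert into the prefix and leaves rest untouched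
theorem pvInsLoop_eq (ch : Char) (r : List Char) :
    ∀ x rest, pvInsLoop (r.reverse ++ x :: rest) ch r.length = (pvInsR ch r).reverse ++ rest := by
  induction r with
  | nil =>
      intro x rest
      simp [pvInsLoop, pvInsR]
  | cons b t ih =>
      intro x rest
      have hget : PySem.List.pyGet? (t.reverse ++ b :: x :: rest) ((t.length : Int)) = some b := by
        have h := PySem.List.pyGet?_append_length (pre := t.reverse) (y := b) (ys := x :: rest)
        rw [List.length_reverse] at h
        exact h
      have harr : (b :: t).reverse ++ x :: rest = t.reverse ++ b :: x :: rest := by simp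
      have hlen : (b :: t).length = t.length + 1 := rfl
      rw [harr, hlen, pvInsLoop, hget]
      simp only [Option.getD_some]
      by_cases hc : ch < b
      · rw [if_pos hc]
        have hset : (t.reverse ++ b :: x :: rest).set (t.length + 1) b
            = t.reverse ++ b :: b :: rest := by
          have : t.length + 1 = t.reverse.length + 1 := by rw [List.length_reverse]
          rw [this, List.set_append_right _ _ (by omega)]
          simp
        rw [hset, ih b (b :: rest)]
        simp [pvInsR, hc]
      · rw [if_neg hc]
        have : t.length + 1 = t.reverse.length + 1 := by rw [List.length_reverse]
        rw [this, List.set_append_right _ _ (by omega)]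
        simp [pvInsR, hc]

-- one outer step: pvInsert right-inserts l[u] into the (reversed) prefix of length u
theorem pvInsert_step (l : List Char) (u : Nat) (hu : u < l.length) :
    pvInsert l (u : Int) = (pvInsR l[u] (l.take u).reverse).reverse ++ l.drop (u + 1) := by
  have hne : l ≠ [] := by intro h; subst h; simp at hu
  have hget : PySem.List.pyGet? l (u : Int) = some l[u] := by
    rw [PySem.List.pyGet?_natCast]; simp [hu]
  have hdecomp : l = l.take u ++ l[u] :: l.drop (u + 1) := by
    conv_lhs => rw [← List.take_append_drop u l]
    rw [List.drop_eq_getElem_cons hu]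
  have hlen : ((l.take u).reverse).length = u := by
    simp [List.length_take, Nat.min_eq_left (le_of_lt hu)]
  unfold pvInsert
  rw [if_neg hne, hget]
  simp only [Option.getD_some, Int.toNat_natCast]
  calc pvInsLoop l l[u] u
      = pvInsLoop ((l.take u).reverse.reverse ++ l[u] :: l.drop (u + 1)) l[u]
          ((l.take u).reverse).length := by
        rw [hlen, List.reverse_reverse, ← hdecomp]
    _ = (pvInsR l[u] (l.take u).reverse).reverse ++ l.drop (u + 1) := pvInsLoop_eq ..

-- outer loop invariant: permutation + sortedness of the growing prefix (fuel n bounds the remaining iterations)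
theorem pvOuter_sorts : ∀ (n : Nat) (l : List Char) (u : Nat),
    l.length - u ≤ n → (l.take u).Pairwise (· ≤ ·) →
    List.Perm (pvOuter l (u : Int) n) l ∧ (pvOuter l (u : Int) n).Pairwise (· ≤ ·) := by
  intro n
  induction n with
  | zero =>
      intro l u hn hs
      have hle : l.length ≤ u := by omega
      rw [List.take_of_length_le hle] at hs
      exact ⟨List.Perm.refl l, hs⟩
  | succ n ih =>
      intro l u hn hs
      by_cases hu : u < l.length
      · rw [pvOuter, if_pos (by exact_mod_cast hu)]
        set X := (pvInsR l[u] (l.take u).reverse).reverse with hX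
        have hins : pvInsert l (u : Int) = X ++ l.drop (u + 1) := pvInsert_step l u hu
        have hXperm : List.Perm X (l[u] :: l.take u) :=
          ((List.reverse_perm _).trans (pvInsR_perm _ _)).trans
            ((List.reverse_perm _).cons _)
        have hXlen : X.length = u + 1 := by
          rw [hXperm.length_eq]; simp [List.length_take, Nat.min_eq_left (le_of_lt hu)]
        have hXsorted : X.Pairwise (· ≤ ·) := by
          rw [hX, List.pairwise_reverse]
          refine pvInsR_pairwise _ _ ?_
          rw [List.pairwise_reverse]
          exact hs
        have hdecomp : l = l.take u ++ l[u] :: l.drop (u + 1) := by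
          conv_lhs => rw [← List.take_append_drop u l]
          rw [List.drop_eq_getElem_cons hu]
        have hperm : List.Perm (X ++ l.drop (u + 1)) l := by
          refine ((hXperm.append_right _).trans List.perm_middle.symm).trans ?_
          exact List.Perm.of_eq hdecomp.symm
        have hlen' : (X ++ l.drop (u + 1)).length = l.length := hperm.length_eq
        have htake : ((X ++ l.drop (u + 1)).take (u + 1)) = X := by
          rw [List.take_append_of_le_length (by omega), List.take_of_length_le (by omega)]
        have hcast : ((u : Int) + 1) = ((u + 1 : Nat) : Int) := by push_cast; ring
        rw [hins, hcast]
        have := ih (X ++ l.drop (u + 1)) (u + 1) (by omega) (by rw [htake]; exact hXsorted)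
        exact ⟨this.1.trans hperm, this.2⟩
      · rw [pvOuter, if_neg (by exact_mod_cast hu)]
        rw [List.take_of_length_le (by omega)] at hs
        exact ⟨List.Perm.refl l, hs⟩

-- ---------- B-side: counting sort produces the sorted permutation ----------
theorem pvCounts_getD_aux (c : Nat) (hc : c < 128) :
    ∀ (t : List Char) (init : List Nat), init.length = 128 → (∀ ch ∈ t, ch.toNat < 128) →
    (t.foldl (fun cnts ch => cnts.set ch.toNat (cnts.getD ch.toNat 0 + 1)) init).getD c 0
      = init.getD c 0 + t.count (Char.ofNat c) := by
  intro t
  induction t with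
  | nil => intro init _ _; simp
  | cons ch t ih =>
      intro init hlen hall
      have hch : ch.toNat < 128 := hall ch List.mem_cons_self
      rw [List.foldl_cons,
        ih _ (by simp [hlen]) (fun x hx => hall x (List.mem_cons_of_mem _ hx)),
        List.count_cons]
      simp only [beq_iff_eq]
      have hiff := pv_char_eq_ofNat_iff ch c hc
      have hbc : c < init.length := by omega
      have hbs : c < (init.set ch.toNat (init.getD ch.toNat 0 + 1)).length := by
        rw [List.length_set]; omega
      by_cases he : ch.toNat = c
      · have hcc : ch = Char.ofNat c := hiff.mpr he
        have hset : (init.set ch.toNat (init.getD ch.toNat 0 + 1)).getD c 0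
            = init.getD c 0 + 1 := by
          subst he
          rw [List.getD_eq_getElem _ _ hbs]
          exact List.getElem_set_self _
        rw [hset, if_pos hcc]
        omega
      · have hset : (init.set ch.toNat (init.getD ch.toNat 0 + 1)).getD c 0
            = init.getD c 0 := by
          calc (init.set ch.toNat (init.getD ch.toNat 0 + 1)).getD c 0
              = (init.set ch.toNat (init.getD ch.toNat 0 + 1))[c]'hbs :=
                List.getD_eq_getElem _ _ hbs
            _ = init[c]'hbc := List.getElem_set_ne (by omega) hbs
            _ = init.getD c 0 := (List.getD_eq_getElem _ _ hbc).symm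
        rw [hset, if_neg (fun hcon => he (hiff.mp hcon))]
        omega
  
theorem pvCounts_getD (t : List Char) (hall : ∀ ch ∈ t, ch.toNat < 128) (c : Nat) (hc : c < 128) :
    (pvCounts t).getD c 0 = t.count (Char.ofNat c) := by
  unfold pvCounts
  rw [pvCounts_getD_aux c hc t _ (by simp) hall]
  have hb : c < (List.replicate 128 (0 : Nat)).length := by rw [List.length_replicate]; omega
  rw [List.getD_eq_getElem _ _ hb, List.getElem_replicate, Nat.zero_add]

theorem pvEmit_count (cnts : List Nat) (n : Nat) (hn : n ≤ 128) (x : Char) :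
    (pvEmit cnts n).count x = if x.toNat < n then cnts.getD x.toNat 0 else 0 := by
  induction n with
  | zero => simp [pvEmit]
  | succ n ih =>
      have hn' : n ≤ 128 := by omega
      have hdec : pvEmit cnts (n + 1)
          = pvEmit cnts n ++ List.replicate (cnts.getD n 0) (Char.ofNat n) := by
        unfold pvEmit; rw [List.range_succ]; simp
      rw [hdec, List.count_append, ih hn', List.count_replicate]
      have hiff : (Char.ofNat n = x) ↔ x.toNat = n := by
        rw [eq_comm, pv_char_eq_ofNat_iff x n (by omega)]
      simp only [beq_iff_eq, hiff]
      by_cases h1 : x.toNat < n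
      · rw [if_pos h1, if_neg (by omega), if_pos (by omega), Nat.add_zero]
      · by_cases h2 : x.toNat = n
        · rw [if_neg h1, if_pos h2, if_pos (by omega), h2, Nat.zero_add]
        · rw [if_neg h1, if_neg h2, if_neg (by omega), Nat.zero_add]

theorem pvEmit_sorted (cnts : List Nat) (n : Nat) (hn : n ≤ 128) :
    (pvEmit cnts n).Pairwise (· ≤ ·) ∧ ∀ y ∈ pvEmit cnts n, y.toNat < n := by
  induction n with
  | zero => simp [pvEmit]
  | succ n ih =>
      have hn' : n ≤ 128 := by omega
      obtain ⟨ihs, ihb⟩ := ih hn'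
      have hdec : pvEmit cnts (n + 1)
          = pvEmit cnts n ++ List.replicate (cnts.getD n 0) (Char.ofNat n) := by
        unfold pvEmit; rw [List.range_succ]; simp
      constructor
      · rw [hdec, List.pairwise_append]
        refine ⟨ihs, List.pairwise_replicate.mpr (Or.inr le_rfl), fun y hy z hz => ?_⟩
        have hz' : z = Char.ofNat n := List.eq_of_mem_replicate hz
        rw [pv_char_le_iff, hz', pv_charOfNat_toNat n (by omega)]
        exact le_of_lt (ihb y hy)
      · intro y hy
        rw [hdec, List.mem_append] at hy
        rcases hy with hy | hy
        · exact Nat.lt_succ_of_lt (ihb y hy)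
        · rw [List.eq_of_mem_replicate hy, pv_charOfNat_toNat n (by omega)]; omega

theorem pvEmit_perm (t : List Char) (hall : ∀ ch ∈ t, ch.toNat < 128) :
    List.Perm (pvEmit (pvCounts t) 128) t := by
  rw [List.perm_iff_count]
  intro x
  rw [pvEmit_count _ 128 le_rfl x]
  by_cases hx : x.toNat < 128
  · rw [if_pos hx, pvCounts_getD t hall x.toNat hx, Char.ofNat_toNat]
  · rw [if_neg hx, eq_comm, List.count_eq_zero]
    intro hmem; exact hx (hall x hmem)

-- ---------- assembly ----------
theorem pv_dom_chars (s : String) (h : Dom_sort_string_of_lower_case_alphabet s) :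
    ∀ ch ∈ s.toList, ch.toNat < 128 := by
  intro ch hch
  have := List.all_eq_true.mp h ch hch
  simp only [pvDomChar, Bool.or_eq_true, Bool.and_eq_true, decide_eq_true_eq, beq_iff_eq] at this
  omega

theorem pv_alt_eq (s : String) (h : Dom_sort_string_of_lower_case_alphabet s)
    (L : List Char) (hperm : List.Perm L s.toList) (hsort : L.Pairwise (· ≤ ·)) :
    String.ofList L = sort_string_of_lower_case_alphabet_alt s := by
  unfold sort_string_of_lower_case_alphabet_alt
  congr 1
  have hall := pv_dom_chars s h
  obtain ⟨hbs, _⟩ := pvEmit_sorted (pvCounts s.toList) 128 le_rfl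
  exact List.Perm.eq_of_pairwise (fun a b _ _ h1 h2 => le_antisymm h1 h2)
    hsort hbs (hperm.trans (pvEmit_perm s.toList hall).symm)

-- ===== VERDICT (by name: the statement is the Claim_ definition above) =====
theorem sort_string_of_lower_case_alphabet_spec : Claim_equal_sort_string_of_lower_case_alphabet := by
  intro s hdom
  unfold Spec_sort_string_of_lower_case_alphabet sort_string_of_lower_case_alphabet
  by_cases h0 : s.toList = []
  · rw [if_pos h0]
    have h := pv_alt_eq s hdom s.toList (List.Perm.refl _) (by rw [h0]; simp)
    rwa [String.ofList_toList] at h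
  · rw [if_neg h0]
    by_cases h1 : s.toList.length = 1
    · rw [if_pos h1]
      have hp : s.toList.Pairwise (· ≤ ·) := by
        rcases hl : s.toList with _ | ⟨a, t⟩
        · simp
        · rcases t with _ | ⟨b, t'⟩
          · simp
          · rw [hl] at h1; simp at h1
      have h := pv_alt_eq s hdom s.toList (List.Perm.refl _) hp
      rwa [String.ofList_toList] at h
    · rw [if_neg h1]
      have hs1 : (s.toList.take 1).Pairwise (· ≤ ·) := by
        rw [List.take_one]
        cases s.toList.head? <;> simp
      have hmain := pvOuter_sorts s.toList.length s.toList 1 (by omega) hs1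
      have hone : ((1 : Nat) : Int) = (1 : Int) := by norm_num
      rw [hone] at hmain
      exact pv_alt_eq s hdom _ hmain.1 hmain.2
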